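-- pv_equiv track=rewrite | github.com/Arsen1302/Code-copy-detector | TestData/solutions/problem_478_5.py | solution_478_5
-- ===== SOURCE A (Python) =====
-- def solution_478_5(n: int) -> int:
--     ans = 0
--     for i in range(1, n+1):
--         p = ''
--         if '3' in str(i) or '4' in str(i) or '7' in str(i):
--             continue
--         for j in str(i):
--             if j == '0':
--                 p += '0'
--             elif j == '1':
--                 p += '1'
--             elif j == '8':
--                 p += '8'
--
--             elif j == '2':
--                 p += '5'
--             elif j == '5':
--                 p += '2'
--
--             elif j == '6':
--                 p += '9'
--             elif j == '9':
--                 p += '6'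
--
--         if p != str(i):
--             ans += 1
--
--     return ans
-- ===== SOURCE B (Python) =====
-- def _count(n, allowed):
--     # numbers x in [1, n] all of whose decimal digits lie in `allowed`
--     if n <= 0:
--         return 0
--     q, r = divmod(n, 10)
--     total = sum(1 for d in allowed if 1 <= d <= min(n, 9))
--     if q >= 1:
--         total += len(allowed) * _count(q - 1, allowed)
--         if _all_digits(q, allowed):
--             total += sum(1 for d in allowed if d <= r)
--     return total
--
-- def _all_digits(q, allowed):
--     while q:
--         q, d = divmod(q, 10)
--         if d not in allowed:
--             return False
--     return True
--
-- def solution_478_5(n: int) -> int: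
--     # rotatable-and-different = (all digits in 0,1,2,5,6,8,9) minus (all digits in 0,1,8)
--     return _count(n, (0, 1, 2, 5, 6, 8, 9)) - _count(n, (0, 1, 8))
-- ===== Notes on version B (the rewrite author's own statement) =====
-- stated objective: faster
-- what changed: Replaced the 1..n scan with string rotation per number by a recursive digit-counting (digit-DP) identity: answer = #(numbers with digits in {0,1,2,5,6,8,9}) - #(numbers with digits in {0,1,8}), each counted in O(log^2 n) arithmetic without enumerating numbers or building strings.
import Mathlib
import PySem

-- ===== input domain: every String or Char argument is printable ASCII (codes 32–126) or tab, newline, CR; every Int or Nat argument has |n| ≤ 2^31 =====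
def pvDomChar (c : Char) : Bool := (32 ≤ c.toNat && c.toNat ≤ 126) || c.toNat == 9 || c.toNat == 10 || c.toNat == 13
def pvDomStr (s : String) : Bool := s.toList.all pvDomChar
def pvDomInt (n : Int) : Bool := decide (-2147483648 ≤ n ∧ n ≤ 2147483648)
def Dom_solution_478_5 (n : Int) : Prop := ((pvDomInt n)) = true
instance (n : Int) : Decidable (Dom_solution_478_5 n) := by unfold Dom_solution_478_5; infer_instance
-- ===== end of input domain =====

-- B replaces A's 1..n scan (string-rotating every number) by a recursive digit-counting
-- identity evaluated in O(log^2 n) arithmetic steps (objective: faster, asymptotic).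


-- ===== PORT A =====
-- the inner 'for j in str(i)' body: p += the rotated digit (nothing for unmapped chars)
def pvRotA (p : List Char) (j : Char) : List Char :=
  if j = '0' then p ++ ['0']
  else if j = '1' then p ++ ['1']
  else if j = '8' then p ++ ['8']
  else if j = '2' then p ++ ['5']
  else if j = '5' then p ++ ['2']
  else if j = '6' then p ++ ['9']
  else if j = '9' then p ++ ['6']
  else p

def solution_478_5 (n : Int) : Int :=
  (PySem.List.pyRange 1 (n + 1) 1).foldl (fun ans i =>
    let s := PySem.Int.toChars i
    if PySem.Chars.isIn ['3'] s || PySem.Chars.isIn ['4'] s || PySem.Chars.isIn ['7'] s then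
      ans
    else
      let p := s.foldl pvRotA []
      if p ≠ s then ans + 1 else ans) 0

-- ===== PORT B =====
-- while q: q, d = divmod(q, 10); if d not in allowed: return False
-- (the '0 < q' guard makes the loop total in Lean; B only calls it with q ≥ 1)
def pvAllDigits (allowed : List Int) (q : Int) : Bool :=
  if h : 0 < q then
    if allowed.contains (PySem.Int.mod q 10) then pvAllDigits allowed (PySem.Int.floordiv q 10)
    else false
  else true
termination_by q.toNat
decreasing_by
  rw [PySem.Int.floordiv_eq_ediv_of_pos (by norm_num : (0:Int) < 10)]
  omega

-- numbers x in [1, n] all of whose decimal digits lie in `allowed`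
def pvCount (allowed : List Int) (n : Int) : Int :=
  if h : n ≤ 0 then 0
  else
    let q := PySem.Int.floordiv n 10
    let r := PySem.Int.mod n 10
    let total : Int := (allowed.countP (fun d => decide (1 ≤ d) && decide (d ≤ min n 9)) : Int)
    if hq : 1 ≤ q then
      total + (allowed.length : Int) * pvCount allowed (q - 1)
        + (if pvAllDigits allowed q then (allowed.countP (fun d => decide (d ≤ r)) : Int) else 0)
    else total
termination_by n.toNat
decreasing_by
  simp only [q, PySem.Int.floordiv_eq_ediv_of_pos (by norm_num : (0:Int) < 10)] at hq ⊢
  omega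

def solution_478_5_alt (n : Int) : Int :=
  pvCount [0, 1, 2, 5, 6, 8, 9] n - pvCount [0, 1, 8] n

-- ===== PRECONDITION & SPEC =====
def Spec_solution_478_5 (n : Int) (out : Int) : Prop := out = solution_478_5_alt n
instance (n : Int) (out : Int) : Decidable (Spec_solution_478_5 n out) := by unfold Spec_solution_478_5; infer_instance

-- ===== CLAIM (what is proved, stated in full; the proofs are below) =====
def Claim_equal_solution_478_5 : Prop := ∀ (n : Int), Dom_solution_478_5 n → Spec_solution_478_5 n (solution_478_5 n)

-- ===== LEMMAS AND PROOFS =====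

-- decimal digits of m, least significant first ([m] for m < 10)
def pvDigits (m : Nat) : List Nat :=
  if h : m < 10 then [m] else m % 10 :: pvDigits (m / 10)
decreasing_by omega

lemma pvDigits_lt (m : Nat) : ∀ d ∈ pvDigits m, d < 10 := by
  induction m using pvDigits.induct with
  | case1 m h => simpa [pvDigits, h] using h
  | case2 m h ih =>
    rw [pvDigits]; simp only [dif_neg h, List.mem_cons]
    rintro d (rfl | hd)
    · omega
    · exact ih d hd

-- Nat.toDigits 10 m is the reversed digit list rendered through Nat.digitChar
lemma pvToDigitsCore_eq (fuel m : Nat) (ds : List Char) (h : m < fuel) :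
    Nat.toDigitsCore 10 fuel m ds = (pvDigits m).reverse.map Nat.digitChar ++ ds := by
  induction fuel generalizing m ds with
  | zero => omega
  | succ fuel ih =>
    rw [Nat.toDigitsCore]
    by_cases hm : m < 10
    · have h0 : m / 10 = 0 := by omega
      have hmm : m % 10 = m := by omega
      simp [h0, pvDigits, hm, hmm]
    · have h0 : ¬ m / 10 = 0 := by omega
      rw [if_neg h0, ih (m / 10) _ (by omega)]
      conv_rhs => rw [pvDigits, dif_neg hm]
      simp

lemma pvToDigits_eq (m : Nat) :
    Nat.toDigits 10 m = (pvDigits m).reverse.map Nat.digitChar := by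
  simpa using pvToDigitsCore_eq (m + 1) m [] (by omega)

lemma pvToChars_eq (i : Int) (hi : 0 ≤ i) :
    PySem.Int.toChars i = (pvDigits i.toNat).reverse.map Nat.digitChar := by
  rw [PySem.Int.toChars, if_neg (by omega), pvToDigits_eq]

-- membership of a specific digit's char
lemma pvMemChar (m : Nat) (d : Nat) (hd : d < 10) :
    Nat.digitChar d ∈ PySem.Int.toChars (m : Int) ↔ d ∈ pvDigits m := by
  rw [pvToChars_eq _ (by positivity)]
  simp only [List.mem_map, List.mem_reverse, Int.toNat_natCast]
  constructor
  · rintro ⟨e, he, hc⟩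
    have he10 := pvDigits_lt m e he
    have : e = d := by interval_cases e <;> interval_cases d <;> simp_all [Nat.digitChar]
    exact this ▸ he
  · intro h; exact ⟨d, h, rfl⟩

-- all digits of m lie in S (S as Python ints)
def pvAllIn (S : List Int) (m : Nat) : Bool := (pvDigits m).all (fun d => S.contains (d : Int))

lemma pvAllDigits_eq (S : List Int) (q : Int) (hq : 1 ≤ q) :
    pvAllDigits S q = pvAllIn S q.toNat := by
  generalize hm : q.toNat = m
  induction m using Nat.strong_induction_on generalizing q with
  | _ m ih =>
  rw [pvAllDigits, dif_pos (by omega : 0 < q),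
    PySem.Int.mod_eq_emod_of_pos (by norm_num : (0:Int) < 10),
    PySem.Int.floordiv_eq_ediv_of_pos (by norm_num : (0:Int) < 10)]
  by_cases h10 : q < 10
  · have h1 : q % 10 = q := by omega
    have h2 : q / 10 = 0 := by omega
    have h3 : ((m : Int)) = q := by omega
    rw [h1, h2, pvAllDigits]
    rw [pvAllIn, pvDigits, dif_pos (by omega : m < 10)]
    simp [h3]
  · have h1 : ((m % 10 : Nat) : Int) = q % 10 := by omega
    have h2 : (q / 10).toNat = m / 10 := by omega
    rw [pvAllIn, pvDigits, dif_neg (by omega : ¬ m < 10)]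
    rw [List.all_cons, h1]
    rw [ih (m / 10) (by omega) (q / 10) (by omega) h2]
    rw [pvAllIn]
    cases hc : S.contains (q % 10) <;> simp_all

-- countP surgery on a duplicate-free list
lemma pvCountP_split (S : List Int) (hS : S.Nodup) (p q : Int → Bool) (x : Int)
    (hpq : ∀ d ∈ S, p d = (q d || (d == x))) (hqx : q x = false) :
    (S.countP p : Int) = (S.countP q : Int) + (if x ∈ S then 1 else 0) := by
  induction S with
  | nil => simp
  | cons a t ih =>
    obtain ⟨hat, ht⟩ := List.nodup_cons.mp hS
    have hpa := hpq a (by simp)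
    rw [List.countP_cons, List.countP_cons]
    by_cases hax : a = x
    · subst hax
      have h1 : p a = true := by rw [hpa, hqx]; simp
      have h2 := ih ht (fun d hd => hpq d (by simp [hd]))
      rw [if_neg (by simp [hat] : ¬ a ∈ t)] at h2
      simp only [h1, hqx, if_pos (List.mem_cons_self)]
      push_cast
      omega
    · have h1 : p a = q a := by
        rw [hpa]
        have : (a == x) = false := by simp [hax]
        simp [this]
      have h2 := ih ht (fun d hd => hpq d (by simp [hd]))
      have h3 : (x ∈ a :: t) ↔ (x ∈ t) := by
        simp only [List.mem_cons, or_iff_right_iff_imp]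
        intro h; exact absurd h.symm hax
      rw [h1]
      by_cases hxt : x ∈ t <;> cases hqa : q a <;>
        simp_all

-- abbreviations for the two countP sums inside pvCount
def pvF (S : List Int) (r : Int) : Int := (S.countP (fun d => decide (d ≤ r)) : Int)
def pvC (S : List Int) (n : Int) : Int :=
  (S.countP (fun d => decide (1 ≤ d) && decide (d ≤ min n 9)) : Int)

lemma pvF_nine (S : List Int) (hd : ∀ d ∈ S, 0 ≤ d ∧ d ≤ 9) (r : Int) (hr : 9 ≤ r) :
    pvF S r = (S.length : Int) := by
  rw [pvF, List.countP_eq_length.mpr]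
  intro d hdm
  have := hd d hdm
  simp; omega

lemma pvF_zero (S : List Int) (hS : S.Nodup) (hd : ∀ d ∈ S, 0 ≤ d ∧ d ≤ 9) :
    pvF S 0 = (if (0:Int) ∈ S then 1 else 0) := by
  rw [pvF, pvCountP_split S hS _ (fun _ => false) 0
    (fun d hdm => by have := hd d hdm; rw [Bool.eq_iff_iff]; simp; omega) rfl]
  simp

lemma pvF_step (S : List Int) (hS : S.Nodup) (r : Int) (hr : 0 ≤ r) :
    pvF S r = pvF S (r - 1) + (if r ∈ S then 1 else 0) := by
  rw [pvF, pvF, pvCountP_split S hS _ (fun d => decide (d ≤ r - 1)) r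
    (fun d _ => by rw [Bool.eq_iff_iff]; simp; omega)
    (by rw [decide_eq_false_iff_not]; omega)]

lemma pvC_large (S : List Int) (n m : Int) (hn : 9 ≤ n) (hm : 9 ≤ m) :
    pvC S n = pvC S m := by
  rw [pvC, pvC]
  congr 1
  apply List.countP_congr
  intro d _
  have h1 : min n 9 = 9 := by omega
  have h2 : min m 9 = 9 := by omega
  rw [h1, h2]

lemma pvC_step (S : List Int) (hS : S.Nodup) (n : Int) (h1 : 1 ≤ n) (h9 : n ≤ 9) :
    pvC S n = pvC S (n - 1) + (if n ∈ S then 1 else 0) := by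
  have hm1 : min n 9 = n := by omega
  have hm2 : min (n - 1) 9 = n - 1 := by omega
  rw [pvC, pvC, hm1, hm2, pvCountP_split S hS _ (fun d => decide (1 ≤ d) && decide (d ≤ n - 1)) n
    (fun d _ => by rw [Bool.eq_iff_iff]; simp; omega)
    (by rw [Bool.and_eq_false_iff, decide_eq_false_iff_not, decide_eq_false_iff_not]; omega)]

lemma pvC_zero (S : List Int) : pvC S 0 = 0 := by
  have hm : min (0:Int) 9 = 0 := by omega
  rw [pvC, hm, List.countP_eq_zero.mpr]
  · rfl
  · intro d _; simp; omega

lemma pvAllIn_small (S : List Int) (n : Int) (h1 : 1 ≤ n) (h9 : n ≤ 9) :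
    pvAllIn S n.toNat = S.contains n := by
  rw [pvAllIn, pvDigits, dif_pos (by omega : n.toNat < 10)]
  have h : ((n.toNat : Int)) = n := by omega
  simp [h]

lemma pvAllIn_rec (S : List Int) (n : Int) (h : 10 ≤ n) :
    pvAllIn S n.toNat = (S.contains (n % 10) && pvAllIn S ((n / 10).toNat)) := by
  rw [pvAllIn, pvDigits, dif_neg (by omega : ¬ n.toNat < 10), List.all_cons]
  have h1 : ((n.toNat % 10 : Nat) : Int) = n % 10 := by omega
  have h2 : n.toNat / 10 = (n / 10).toNat := by omega
  rw [h1, h2, pvAllIn]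

lemma pvCount_nonpos (S : List Int) (n : Int) (h : n ≤ 0) : pvCount S n = 0 := by
  rw [pvCount, dif_pos h]

-- pvCount unfolded through pvF/pvC, for n ≥ 1
lemma pvCount_unfold (S : List Int) (n : Int) (h : 1 ≤ n) :
    pvCount S n = pvC S n +
      (if 1 ≤ n / 10 then
        (S.length : Int) * pvCount S (n / 10 - 1) +
          (if pvAllDigits S (n / 10) then pvF S (n % 10) else 0)
       else 0) := by
  rw [pvCount, dif_neg (by omega : ¬ n ≤ 0)]
  simp only [PySem.Int.floordiv_eq_ediv_of_pos (by norm_num : (0:Int) < 10),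
    PySem.Int.mod_eq_emod_of_pos (by norm_num : (0:Int) < 10)]
  by_cases hq : 1 ≤ n / 10
  · rw [dif_pos hq, if_pos hq, pvC, pvF]; ring
  · rw [dif_neg hq, if_neg hq, pvC]; ring

-- the step identity: pvCount S n = pvCount S (n-1) + [all digits of n in S]
lemma pvCount_step (S : List Int) (hS : S.Nodup) (hd : ∀ d ∈ S, 0 ≤ d ∧ d ≤ 9)
    (n : Int) (hn : 1 ≤ n) :
    pvCount S n = pvCount S (n - 1) + (if pvAllIn S n.toNat then 1 else 0) := by
  generalize hm : n.toNat = m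
  induction m using Nat.strong_induction_on generalizing n with
  | _ m ih =>
  subst hm
  by_cases h9 : n ≤ 9
  · -- single-digit n
    rw [pvCount_unfold S n hn, if_neg (by omega : ¬ 1 ≤ n / 10), pvAllIn_small S n hn h9]
    by_cases h1 : n = 1
    · subst h1
      have h0 : pvCount S (1 - 1 : Int) = 0 := pvCount_nonpos S _ (by norm_num)
      rw [h0, pvC_step S hS 1 (by omega) (by omega)]
      norm_num [pvC_zero, List.contains_iff_mem]
    · rw [pvCount_unfold S (n - 1) (by omega), if_neg (by omega : ¬ 1 ≤ (n - 1) / 10),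
        pvC_step S hS n hn h9]
      simp [List.contains_iff_mem]
  · -- n ≥ 10
    have hq1 : (1:Int) ≤ n / 10 := by omega
    rw [pvCount_unfold S n hn, if_pos hq1, pvAllDigits_eq S (n / 10) hq1,
      pvAllIn_rec S n (by omega)]
    by_cases hr : 1 ≤ n % 10
    · have hqq : (n - 1) / 10 = n / 10 := by omega
      have hrr : (n - 1) % 10 = n % 10 - 1 := by omega
      rw [pvCount_unfold S (n - 1) (by omega), hqq, hrr, if_pos hq1,
        pvAllDigits_eq S (n / 10) hq1, pvC_large S n (n - 1) (by omega) (by omega),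
        pvF_step S hS (n % 10) (by omega)]
      simp only [List.contains_iff_mem, Bool.and_eq_true]
      by_cases hA : pvAllIn S ((n / 10).toNat) = true <;> by_cases hc : (n % 10) ∈ S <;>
        simp [hA, hc] <;> ring
    · have hr0 : n % 10 = 0 := by omega
      have hq' : (n - 1) / 10 = n / 10 - 1 := by omega
      have hr' : (n - 1) % 10 = 9 := by omega
      rw [pvCount_unfold S (n - 1) (by omega), hq', hr', hr0, pvF_zero S hS hd,
        pvC_large S n (n - 1) (by omega) (by omega)]
      by_cases hq2 : (1:Int) ≤ n / 10 - 1
      · rw [if_pos hq2, pvAllDigits_eq S (n / 10 - 1) hq2, pvF_nine S hd 9 (by omega),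
          ih (n / 10 - 1).toNat (by omega) (n / 10 - 1) hq2 rfl]
        have ht : (n / 10 - 1).toNat = (n / 10).toNat - 1 := by omega
        rw [ht]
        simp only [List.contains_iff_mem, Bool.and_eq_true]
        by_cases hA : pvAllIn S ((n / 10).toNat) = true <;>
          by_cases hB : pvAllIn S ((n / 10).toNat - 1) = true <;>
          by_cases hc : (0:Int) ∈ S <;>
          simp [hA, hB, hc, mul_ite, mul_one, mul_zero] <;> ring
      · have hq10 : n / 10 = 1 := by omega
        rw [if_neg hq2, hq10]
        have h0 : pvCount S (1 - 1 : Int) = 0 := pvCount_nonpos S _ (by norm_num)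
        rw [h0]
        simp only [List.contains_iff_mem, Bool.and_eq_true]
        by_cases hA : pvAllIn S ((1:Int).toNat) = true <;> by_cases hc : (0:Int) ∈ S <;>
          simp [hc]

lemma pvCount_eq_sum (S : List Int) (hS : S.Nodup) (hd : ∀ d ∈ S, 0 ≤ d ∧ d ≤ 9) (n : Int) :
    pvCount S n =
      ((PySem.List.pyRange 1 (n + 1) 1).map
        (fun i => if pvAllIn S i.toNat then (1 : Int) else 0)).sum := by
  generalize hm : n.toNat = m
  induction m using Nat.strong_induction_on generalizing n with
  | _ m ih =>
  subst hm
  by_cases hn : n ≤ 0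
  · rw [pvCount_nonpos S n hn, PySem.List.pyRange_one_eq_nil (by omega : n + 1 ≤ 1)]
    simp
  · rw [pvCount_step S hS hd n (by omega),
      ih (n - 1).toNat (by omega) (n - 1) rfl,
      PySem.List.pyRange_one_succ_right (by omega : (1:Int) ≤ n),
      List.map_append, List.sum_append]
    simp [show n - 1 + 1 = n from by ring]

lemma pvMap_eq_self_iff {α : Type} (l : List α) (f : α → α) :
    l.map f = l ↔ ∀ c ∈ l, f c = c := by
  induction l with
  | nil => simp
  | cons a t ih => simp [ih]

-- A's per-number test as a Bool
def pvIndA (i : Int) : Bool :=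
  if PySem.Chars.isIn ['3'] (PySem.Int.toChars i) ||
      PySem.Chars.isIn ['4'] (PySem.Int.toChars i) ||
      PySem.Chars.isIn ['7'] (PySem.Int.toChars i) then false
  else decide ((PySem.Int.toChars i).foldl pvRotA [] ≠ PySem.Int.toChars i)

-- the digit map A applies to rotatable digit characters
def pvMapB (c : Char) : Char :=
  if c = '2' then '5' else if c = '5' then '2'
  else if c = '6' then '9' else if c = '9' then '6' else c

lemma pvFold_eq_map (cs : List Char) (acc : List Char)
    (h : ∀ c ∈ cs, c ∈ (['0', '1', '8', '2', '5', '6', '9'] : List Char)) :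
    cs.foldl pvRotA acc = acc ++ cs.map pvMapB := by
  induction cs generalizing acc with
  | nil => simp
  | cons c t iht =>
    have hc := h c (List.mem_cons_self)
    have hstep : pvRotA acc c = acc ++ [pvMapB c] := by
      fin_cases hc <;> rfl
    rw [List.foldl_cons, hstep, iht _ (fun x hx => h x (List.mem_cons_of_mem c hx)),
      List.map_cons]
    simp

lemma pvIsIn_digit (m : Nat) (d : Nat) (hd : d < 10) :
    PySem.Chars.isIn [Nat.digitChar d] (PySem.Int.toChars (m : Int)) = true ↔ d ∈ pvDigits m := by
  rw [PySem.Chars.isIn_iff_infix, List.singleton_infix_iff, pvMemChar m d hd]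

-- A's test coincides with the two digit-subset tests, for i ≥ 1
lemma pvIndA_eq (i : Int) (hi : 1 ≤ i) :
    pvIndA i = (pvAllIn [0, 1, 2, 5, 6, 8, 9] i.toNat && !pvAllIn [0, 1, 8] i.toNat) := by
  have hchars : PySem.Int.toChars i = (pvDigits i.toNat).reverse.map Nat.digitChar :=
    pvToChars_eq i (by omega)
  have hcast : ((i.toNat : Int)) = i := by omega
  have hlt := pvDigits_lt i.toNat
  have h3 : (PySem.Chars.isIn ['3'] (PySem.Int.toChars i) = true) ↔ 3 ∈ pvDigits i.toNat := by
    rw [← hcast]; exact pvIsIn_digit i.toNat 3 (by omega)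
  have h4 : (PySem.Chars.isIn ['4'] (PySem.Int.toChars i) = true) ↔ 4 ∈ pvDigits i.toNat := by
    rw [← hcast]; exact pvIsIn_digit i.toNat 4 (by omega)
  have h7 : (PySem.Chars.isIn ['7'] (PySem.Int.toChars i) = true) ↔ 7 ∈ pvDigits i.toNat := by
    rw [← hcast]; exact pvIsIn_digit i.toNat 7 (by omega)
  rw [pvIndA]
  by_cases hbad : 3 ∈ pvDigits i.toNat ∨ 4 ∈ pvDigits i.toNat ∨ 7 ∈ pvDigits i.toNat
  · -- some forbidden digit: LHS is false and the first subset test fails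
    rw [if_pos (by rw [Bool.or_eq_true, Bool.or_eq_true, h3, h4, h7]; tauto)]
    have : pvAllIn [0, 1, 2, 5, 6, 8, 9] i.toNat = false := by
      rw [pvAllIn, List.all_eq_false]
      obtain hb | hb | hb := hbad
      · exact ⟨3, hb, by decide⟩
      · exact ⟨4, hb, by decide⟩
      · exact ⟨7, hb, by decide⟩
    rw [this]; rfl
  · rw [not_or, not_or] at hbad
    rw [if_neg (by rw [Bool.or_eq_true, Bool.or_eq_true, h3, h4, h7]; tauto)]
    have hall7 : pvAllIn [0, 1, 2, 5, 6, 8, 9] i.toNat = true := by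
      rw [pvAllIn, List.all_eq_true]
      intro d hdm
      have h10 := hlt d hdm
      have hd3 : d ≠ 3 := fun h => hbad.1 (h ▸ hdm)
      have hd4 : d ≠ 4 := fun h => hbad.2.1 (h ▸ hdm)
      have hd7 : d ≠ 7 := fun h => hbad.2.2 (h ▸ hdm)
      interval_cases d <;> simp_all
    rw [hall7, Bool.true_and]
    have hcs : ∀ c ∈ PySem.Int.toChars i, c ∈ (['0', '1', '8', '2', '5', '6', '9'] : List Char) := by
      intro c hcm
      rw [hchars] at hcm
      obtain ⟨d, hdm, rfl⟩ := List.mem_map.mp hcm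
      rw [List.mem_reverse] at hdm
      have h10 := hlt d hdm
      have hd3 : d ≠ 3 := fun h => hbad.1 (h ▸ hdm)
      have hd4 : d ≠ 4 := fun h => hbad.2.1 (h ▸ hdm)
      have hd7 : d ≠ 7 := fun h => hbad.2.2 (h ▸ hdm)
      interval_cases d <;> simp_all <;> decide
    rw [pvFold_eq_map _ [] hcs, List.nil_append]
    rcases hrot : pvAllIn [0, 1, 8] i.toNat with hfalse | htrue
    · -- some digit of i is 2, 5, 6 or 9: the mapped string differs
      rw [pvAllIn, List.all_eq_false] at hrot
      obtain ⟨d, hdm, hdn⟩ := hrot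
      have h10 := hlt d hdm
      have hne : pvMapB (Nat.digitChar d) ≠ Nat.digitChar d := by
        simp only [List.contains_iff_mem] at hdn
        interval_cases d <;> simp_all <;> decide
      simp only [Bool.not_false, decide_eq_true_eq]
      intro heq
      rw [pvMap_eq_self_iff] at heq
      exact hne (heq (Nat.digitChar d) (by
        rw [hchars]
        exact List.mem_map_of_mem (List.mem_reverse.mpr hdm)))
    · -- every digit is 0, 1 or 8: the map is the identity
      rw [pvAllIn, List.all_eq_true] at hrot
      have : (PySem.Int.toChars i).map pvMapB = PySem.Int.toChars i := by
        rw [pvMap_eq_self_iff]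
        intro c hcm
        rw [hchars] at hcm
        obtain ⟨d, hdm, rfl⟩ := List.mem_map.mp hcm
        rw [List.mem_reverse] at hdm
        have := hrot d hdm
        have h10 := hlt d hdm
        simp only [List.contains_iff_mem] at this
        interval_cases d <;> simp_all <;> decide
      simp [this]

lemma pvMono (m : Nat) (h : pvAllIn [0, 1, 8] m = true) :
    pvAllIn [0, 1, 2, 5, 6, 8, 9] m = true := by
  rw [pvAllIn, List.all_eq_true] at h ⊢
  intro d hd
  have := h d hd
  simp only [List.contains_iff_mem, List.mem_cons, List.not_mem_nil, or_false] at this ⊢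
  tauto

lemma pvPointwise (m : Nat) :
    (if (pvAllIn [0, 1, 2, 5, 6, 8, 9] m && !pvAllIn [0, 1, 8] m) = true then (1:Int) else 0) =
      (if pvAllIn [0, 1, 2, 5, 6, 8, 9] m = true then (1:Int) else 0) -
        (if pvAllIn [0, 1, 8] m = true then (1:Int) else 0) := by
  have := pvMono m
  cases h7 : pvAllIn [0, 1, 2, 5, 6, 8, 9] m <;> cases h0 : pvAllIn [0, 1, 8] m <;> simp_all

lemma pvSum_split (l : List Int) :
    (l.map (fun i =>
      (if pvAllIn [0, 1, 2, 5, 6, 8, 9] i.toNat = true then (1:Int) else 0) -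
        (if pvAllIn [0, 1, 8] i.toNat = true then (1:Int) else 0))).sum =
    (l.map (fun i => if pvAllIn [0, 1, 2, 5, 6, 8, 9] i.toNat = true then (1:Int) else 0)).sum -
      (l.map (fun i => if pvAllIn [0, 1, 8] i.toNat = true then (1:Int) else 0)).sum := by
  induction l with
  | nil => simp
  | cons a t ih => simp only [List.map_cons, List.sum_cons, ih]; ring

-- ===== VERDICT (by name: the statement is the Claim_ definition above) =====
theorem solution_478_5_spec : Claim_equal_solution_478_5 := by
  unfold Claim_equal_solution_478_5
  intro n _
  show solution_478_5 n = solution_478_5_alt n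
  have hcong := PySem.List.foldl_congr_mem (PySem.List.pyRange 1 (n + 1) 1)
    (fun ans i =>
      let s := PySem.Int.toChars i
      if PySem.Chars.isIn ['3'] s || PySem.Chars.isIn ['4'] s || PySem.Chars.isIn ['7'] s then
        ans
      else
        let p := s.foldl pvRotA []
        if p ≠ s then ans + 1 else ans)
    (fun ans i => ans +
      (if (pvAllIn [0, 1, 2, 5, 6, 8, 9] i.toNat && !pvAllIn [0, 1, 8] i.toNat) = true
        then (1:Int) else 0)) 0
    (by
      intro acc i hi
      have h1i : (1:Int) ≤ i := (PySem.List.mem_pyRange_one.mp hi).1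
      have hI := pvIndA_eq i h1i
      rw [pvIndA] at hI
      show (if PySem.Chars.isIn ['3'] (PySem.Int.toChars i) ||
              PySem.Chars.isIn ['4'] (PySem.Int.toChars i) ||
              PySem.Chars.isIn ['7'] (PySem.Int.toChars i) then acc
            else if (PySem.Int.toChars i).foldl pvRotA [] ≠ PySem.Int.toChars i then acc + 1
            else acc) = _
      split_ifs with hb hp
      · rw [if_pos hb] at hI
        simp [← hI]
      · rw [if_neg hb] at hI
        simp [← hI, hp]
      · rw [if_neg hb] at hI
        simp [← hI, hp])
  rw [solution_478_5, hcong, PySem.List.foldl_add]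
  simp only [pvPointwise]
  rw [pvSum_split,
    ← pvCount_eq_sum [0, 1, 2, 5, 6, 8, 9] (by decide) (by decide) n,
    ← pvCount_eq_sum [0, 1, 8] (by decide) (by decide) n,
    solution_478_5_alt]
  ring
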